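-- pv_equiv track=rewrite | github.com/RAAPID-ORG/stacnotator | backend/src/annotation/service.py | _ordered_columns
-- ===== SOURCE A (Python) =====
-- _STACNOTATOR_COLUMN_ORDER: tuple[str, ...] = (
--     "stacnotator_annotation_number",
--     "stacnotator_task_id",
--     "stacnotator_task_status",
--     "stacnotator_label_id",
--     "stacnotator_label_name",
--     "stacnotator_annotator_count",
--     "stacnotator_annotation_id",
--     "stacnotator_comment",
--     "stacnotator_confidence",
--     "stacnotator_is_authoritative",
--     "stacnotator_flagged_for_review",
--     "stacnotator_flag_comment",
--     "stacnotator_created_by_user_email",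
--     "stacnotator_created_at",
--     "stacnotator_geometry_wkt",
-- )
--
-- def _ordered_columns(records: list[dict]) -> list[str]:
--     """Compute the final column order for an export.
--
--     Stacnotator-generated columns first (in ``_STACNOTATOR_COLUMN_ORDER``),
--     then any raw_source_data / user-provided columns in first-seen order.
--     Only columns that actually appear in at least one record are included.
--     """
--     seen: set[str] = set()
--     for record in records:
--         seen.update(record.keys())
--
--     ordered: list[str] = []
--     for col in _STACNOTATOR_COLUMN_ORDER:
--         if col in seen:
--             ordered.append(col)
--             seen.discard(col)
--     # Remaining keys are user-provided (raw_source_data). Preserve first-seen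
--     # order across the records so the layout is deterministic.
--     for record in records:
--         for key in record:
--             if key in seen:
--                 ordered.append(key)
--                 seen.discard(key)
--     return ordered
-- ===== SOURCE B (Python) =====
-- _STACNOTATOR_COLUMN_ORDER: tuple[str, ...] = (
--     "stacnotator_annotation_number",
--     "stacnotator_task_id",
--     "stacnotator_task_status",
--     "stacnotator_label_id",
--     "stacnotator_label_name",
--     "stacnotator_annotator_count",
--     "stacnotator_annotation_id",
--     "stacnotator_comment",
--     "stacnotator_confidence",
--     "stacnotator_is_authoritative",
--     "stacnotator_flagged_for_review",
--     "stacnotator_flag_comment",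
--     "stacnotator_created_by_user_email",
--     "stacnotator_created_at",
--     "stacnotator_geometry_wkt",
-- )
--
-- def _ordered_columns(records: list[dict]) -> list[str]:
--     # Sort the distinct keys by a numeric rank: a fixed column ranks by its
--     # position in _STACNOTATOR_COLUMN_ORDER (< n), any other key ranks past n
--     # by its first-seen position.
--     keys = list(dict.fromkeys(k for record in records for k in record))
--     rank = {c: i for i, c in enumerate(_STACNOTATOR_COLUMN_ORDER)}
--     n = len(_STACNOTATOR_COLUMN_ORDER)
--     return sorted(keys, key=lambda k: rank.get(k, n + keys.index(k)))
-- ===== Notes on version B (the rewrite author's own statement) =====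
-- stated objective: alternative
-- what changed: Instead of emitting columns in two passes while mutating a shrinking seen-set, B deduplicates the keys once and stable-sorts them under a numeric rank key (position in the fixed column order for fixed columns, 15 + first-seen position for the rest).
import Mathlib
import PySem

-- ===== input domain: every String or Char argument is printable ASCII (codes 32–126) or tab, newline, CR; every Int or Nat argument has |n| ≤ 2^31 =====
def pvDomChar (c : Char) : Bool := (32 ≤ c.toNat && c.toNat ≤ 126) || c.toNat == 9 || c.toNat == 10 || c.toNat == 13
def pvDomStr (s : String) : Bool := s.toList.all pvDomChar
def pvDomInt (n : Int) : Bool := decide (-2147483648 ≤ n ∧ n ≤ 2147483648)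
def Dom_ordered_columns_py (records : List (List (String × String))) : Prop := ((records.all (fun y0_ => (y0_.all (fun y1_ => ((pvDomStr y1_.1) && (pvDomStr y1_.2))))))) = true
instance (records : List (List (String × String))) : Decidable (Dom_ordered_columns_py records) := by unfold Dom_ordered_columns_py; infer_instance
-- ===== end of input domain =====

-- B replaces A's two emission passes over a shrinking seen-set by a single stable sort of the
-- deduplicated keys under a numeric rank (fixed-column position, else 15 + first-seen position);
-- alternative decomposition, same results.

-- ===== PORT A =====
def stacnotatorColumnOrder : List String :=
  ["stacnotator_annotation_number", "stacnotator_task_id", "stacnotator_task_status",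
   "stacnotator_label_id", "stacnotator_label_name", "stacnotator_annotator_count",
   "stacnotator_annotation_id", "stacnotator_comment", "stacnotator_confidence",
   "stacnotator_is_authoritative", "stacnotator_flagged_for_review", "stacnotator_flag_comment",
   "stacnotator_created_by_user_email", "stacnotator_created_at", "stacnotator_geometry_wkt"]

-- the keys of a dict given as an association list: distinct keys, first-seen order (exact for
-- a Python dict built from these pairs: 'record.keys()' / 'for key in record')
def pyDictKeys (record : List (String × String)) : List String :=
  PySem.List.dedup (record.map Prod.fst)

-- A's loop body 'if key in seen: ordered.append(key); seen.discard(key)' (used verbatim by both of A's output passes)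
def ocStep (p : List String × PySem.Set String) (x : String) : List String × PySem.Set String :=
  if PySem.Set.contains p.2 x then (p.1 ++ [x], PySem.Set.discard p.2 x) else p

def ordered_columns_py (records : List (List (String × String))) : List String :=
  -- seen = set(); for record in records: seen.update(record.keys())
  let seen : PySem.Set String :=
    records.foldl (fun s record => PySem.Set.update s (pyDictKeys record)) PySem.Set.empty
  -- ordered = []; for col in _STACNOTATOR_COLUMN_ORDER: if col in seen: append col; seen.discard(col)
  let p1 : List String × PySem.Set String :=
    stacnotatorColumnOrder.foldl ocStep ([], seen)
  -- for record in records: for key in record: if key in seen: append key; seen.discard(key)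
  let p2 : List String × PySem.Set String :=
    records.foldl (fun p record => (pyDictKeys record).foldl ocStep p) p1
  p2.1

-- ===== PORT B =====
-- rank = {c: i for i, c in enumerate(_STACNOTATOR_COLUMN_ORDER)}
def rankDict : PySem.Dict String Int :=
  (PySem.List.enumerate stacnotatorColumnOrder).foldl
    (fun d p => PySem.Dict.insert d p.2 p.1) PySem.Dict.empty

def ordered_columns_py_alt (records : List (List (String × String))) : List String :=
  -- keys = list(dict.fromkeys(k for record in records for k in record))
  let keys : List String := PySem.List.dedup (records.flatMap pyDictKeys)
  -- n = len(_STACNOTATOR_COLUMN_ORDER)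
  let n : Int := (stacnotatorColumnOrder.length : Int)
  -- sorted(keys, key=lambda k: rank.get(k, n + keys.index(k)))
  -- ('keys.index(k)' is exact via index?.getD 0: every k handed to the key comes from keys)
  PySem.List.sorted keys
    (fun k => (PySem.Dict.get? rankDict k).getD
      (n + (((PySem.List.index? keys k).getD 0 : Nat) : Int)))

-- ===== PRECONDITION & SPEC =====
def Spec_ordered_columns_py (records : List (List (String × String))) (out : List String) : Prop := out = ordered_columns_py_alt records
instance (records : List (List (String × String))) (out : List String) : Decidable (Spec_ordered_columns_py records out) := by unfold Spec_ordered_columns_py; infer_instance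

-- ===== CLAIM (what is proved, stated in full; the proofs are below) =====
def Claim_equal_ordered_columns_py : Prop := ∀ (records : List (List (String × String))), Dom_ordered_columns_py records → Spec_ordered_columns_py records (ordered_columns_py records)

-- ===== LEMMAS AND PROOFS =====

-- phase 1 of A: folding 'update' over the records is one update by the flattened key list
theorem foldl_update_eq_update_flatMap (records : List (List (String × String)))
    (s : PySem.Set String) :
    records.foldl (fun s record => PySem.Set.update s (pyDictKeys record)) s
      = PySem.Set.update s (records.flatMap pyDictKeys) := by
  induction records generalizing s with
  | nil => rfl
  | cons r rs ih =>
      rw [List.foldl_cons, ih, List.flatMap_cons]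
      simp only [PySem.Set.update, List.foldl_append]

-- A's nested loop over records/keys is the fold over the flattened key list
theorem foldl_foldl_eq_foldl_flatMap (records : List (List (String × String)))
    (p : List String × PySem.Set String) :
    records.foldl (fun p record => (pyDictKeys record).foldl ocStep p) p
      = (records.flatMap pyDictKeys).foldl ocStep p := by
  induction records generalizing p with
  | nil => rfl
  | cons r rs ih => simp only [List.foldl_cons, List.flatMap_cons, List.foldl_append, ih]

-- core characterisation of A's append-and-discard fold
theorem ocStep_foldl (xs : List String) (acc : List String) (s : PySem.Set String) :
    (xs.foldl ocStep (acc, s)).1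
        = acc ++ (PySem.List.dedup xs).filter (fun c => decide (c ∈ s))
      ∧ (xs.foldl ocStep (acc, s)).2
        = s.filter (fun y => !decide (y ∈ xs)) := by
  induction xs generalizing acc s with
  | nil => simp
  | cons x xs ih =>
      by_cases hx : x ∈ s
      · have hstep : ocStep (acc, s) x = (acc ++ [x], PySem.Set.discard s x) := by
          simp [ocStep, PySem.Set.contains, hx]
        rw [List.foldl_cons, hstep]
        obtain ⟨h1, h2⟩ := ih (acc ++ [x]) (PySem.Set.discard s x)
        constructor
        · rw [h1]
          simp only [PySem.List.dedup_eq_ofList]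
          rw [PySem.Set.ofList_cons, List.filter_cons]
          simp only [hx, decide_true, if_true]
          rw [List.append_assoc]
          congr 1
          rw [List.singleton_append]
          congr 1
          simp only [PySem.Set.discard, List.filter_filter]
          apply List.filter_congr
          intro c _
          by_cases hcx : c = x <;> by_cases hcs : c ∈ s <;>
            simp [hcx, hcs, List.mem_filter]
        · rw [h2]
          simp only [PySem.Set.discard, List.filter_filter]
          apply List.filter_congr
          intro y _
          by_cases hyx : y = x <;> simp [hyx]
      · have hstep : ocStep (acc, s) x = (acc, s) := by
          simp [ocStep, PySem.Set.contains, hx]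
        rw [List.foldl_cons, hstep]
        obtain ⟨h1, h2⟩ := ih acc s
        constructor
        · rw [h1]
          simp only [PySem.List.dedup_eq_ofList]
          rw [PySem.Set.ofList_cons, List.filter_cons]
          simp only [hx, decide_false]
          congr 1
          simp only [PySem.Set.discard, List.filter_filter]
          apply List.filter_congr
          intro c _
          by_cases hcx : c = x
          · subst hcx; simp [hx]
          · simp [hcx]
        · rw [h2]
          apply List.filter_congr
          intro y hy
          have : ¬ y = x := fun h => hx (h ▸ hy)
          simp [this]

-- A computes: present fixed columns in fixed order, then the remaining keys in first-seen order
set_option maxHeartbeats 1000000 in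
theorem portA_eq (records : List (List (String × String))) :
    ordered_columns_py records
      = stacnotatorColumnOrder.filter
          (fun c => decide (c ∈ PySem.List.dedup (records.flatMap pyDictKeys)))
        ++ (PySem.List.dedup (records.flatMap pyDictKeys)).filter
          (fun k => !decide (k ∈ stacnotatorColumnOrder)) := by
  simp only [ordered_columns_py]
  have hONnodup : stacnotatorColumnOrder.Nodup := by decide
  set flat := records.flatMap pyDictKeys with hflat
  set K : List String := PySem.Set.ofList flat with hK
  have hdK : PySem.List.dedup flat = K := PySem.List.dedup_eq_ofList flat
  have hseen : records.foldl (fun s record => PySem.Set.update s (pyDictKeys record))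
      PySem.Set.empty = K := by
    rw [foldl_update_eq_update_flatMap]
    exact PySem.Set.update_nil_left _
  rw [hseen, foldl_foldl_eq_foldl_flatMap]
  obtain ⟨h11, h12⟩ := ocStep_foldl stacnotatorColumnOrder [] K
  have hpair : stacnotatorColumnOrder.foldl ocStep ([], K)
      = (stacnotatorColumnOrder.filter (fun c => decide (c ∈ K)),
         K.filter (fun y => !decide (y ∈ stacnotatorColumnOrder))) := by
    refine Prod.ext ?_ ?_
    · rw [h11, PySem.List.dedup_eq_ofList, PySem.Set.ofList_eq_self_of_nodup _ hONnodup,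
        List.nil_append]
    · exact h12
  rw [hpair]
  obtain ⟨h21, _⟩ := ocStep_foldl flat
      (stacnotatorColumnOrder.filter (fun c => decide (c ∈ K)))
      (K.filter (fun y => !decide (y ∈ stacnotatorColumnOrder)))
  rw [h21, hdK]
  have e2 : K.filter (fun c =>
        decide (c ∈ K.filter (fun y => !decide (y ∈ stacnotatorColumnOrder))))
      = K.filter (fun k => !decide (k ∈ stacnotatorColumnOrder)) := by
    apply List.filter_congr
    intro k hk
    simp only [List.mem_filter, hk, true_and, Bool.decide_eq_true]
  rw [e2]

-- the 15 fixed columns have distinct, position-ordered ranks in rankDict (a closed computation)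
set_option maxHeartbeats 1000000 in
theorem rankDict_get_fixed :
    ∀ c ∈ stacnotatorColumnOrder,
      PySem.Dict.get? rankDict c = some ((List.idxOf c stacnotatorColumnOrder : Nat) : Int) := by
  decide

theorem fixed_idxOf_pairwise :
    stacnotatorColumnOrder.Pairwise
      (fun a b => List.idxOf a stacnotatorColumnOrder < List.idxOf b stacnotatorColumnOrder) := by
  decide

theorem rankDict_keys : rankDict.items.map Prod.fst = stacnotatorColumnOrder := by decide

-- a key outside the fixed columns is absent from rankDict
theorem rankDict_get_none (k : String) (hk : k ∉ stacnotatorColumnOrder) :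
    PySem.Dict.get? rankDict k = none := by
  simp only [PySem.Dict.get?, Option.map_eq_none_iff, List.find?_eq_none]
  intro p hp
  have : p.1 ∈ stacnotatorColumnOrder := by
    rw [← rankDict_keys]; exact List.mem_map_of_mem hp
  simp only [beq_iff_eq]
  intro h; exact hk (h ▸ this)

-- on a duplicate-free list, positions (via idxOf?) strictly increase along the list
theorem nodup_pairwise_idx (xs : List String) (h : xs.Nodup) :
    xs.Pairwise (fun a b => (List.idxOf? a xs).getD 0 < (List.idxOf? b xs).getD 0) := by
  have hsome : ∀ (i : Nat) (hi : i < xs.length), List.idxOf? xs[i] xs = some i := by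
    intro i hi
    rw [List.idxOf?_eq_some_iff]
    refine ⟨hi, rfl, ?_⟩
    intro j hj hgj
    exact absurd ((List.Nodup.getElem_inj_iff h).mp hgj) (Nat.ne_of_lt hj)
  rw [List.pairwise_iff_getElem]
  intro i j hi hj hij
  rw [hsome i hi, hsome j hj]
  simpa using hij

-- the two ports compute the same list
theorem ports_eq (records : List (List (String × String))) :
    ordered_columns_py records = ordered_columns_py_alt records := by
  rw [portA_eq]
  simp only [ordered_columns_py_alt]
  set keys := PySem.List.dedup (records.flatMap pyDictKeys) with hkeys
  have hknd : keys.Nodup := by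
    rw [hkeys, PySem.List.dedup_eq_ofList]; exact PySem.Set.nodup_ofList _
  have hONnodup : stacnotatorColumnOrder.Nodup := by decide
  set keyf : String → Int := fun k => (PySem.Dict.get? rankDict k).getD
      ((stacnotatorColumnOrder.length : Int)
        + (((PySem.List.index? keys k).getD 0 : Nat) : Int)) with hkeyf
  set F := stacnotatorColumnOrder.filter (fun c => decide (c ∈ keys)) with hF
  set R := keys.filter (fun k => !decide (k ∈ stacnotatorColumnOrder)) with hR
  -- key values on the two parts
  have hkF : ∀ c ∈ F, keyf c = ((List.idxOf c stacnotatorColumnOrder : Nat) : Int) := by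
    intro c hc
    have hcf : c ∈ stacnotatorColumnOrder := (List.mem_filter.mp hc).1
    simp [hkeyf, rankDict_get_fixed c hcf]
  have hkR : ∀ k ∈ R, keyf k
      = (stacnotatorColumnOrder.length : Int) + (((List.idxOf? k keys).getD 0 : Nat) : Int) := by
    intro k hk
    have hknf : k ∉ stacnotatorColumnOrder := by
      have := (List.mem_filter.mp hk).2; simpa using this
    simp [hkeyf, rankDict_get_none k hknf, PySem.List.index?]
  -- (F ++ R) is a permutation of keys
  have hperm : (F ++ R).Perm keys := by
    have h1 : (keys.filter (fun k => decide (k ∈ stacnotatorColumnOrder)) ++ R).Perm keys := by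
      rw [hR]; exact List.filter_append_perm _ keys
    refine List.Perm.trans (List.Perm.append_right R ?_) h1
    rw [List.perm_ext_iff_of_nodup (hONnodup.filter _) (hknd.filter _)]
    intro a
    simp only [List.mem_filter, decide_eq_true_eq]
    tauto
  -- (F ++ R) is strictly increasing under keyf
  have hpw : (F ++ R).Pairwise (fun a b => keyf a < keyf b) := by
    rw [List.pairwise_append]
    refine ⟨?_, ?_, ?_⟩
    · refine List.Pairwise.imp_of_mem ?_
        ((fixed_idxOf_pairwise).sublist (hF ▸ List.filter_sublist))
      intro a b ha hb hlt
      rw [hkF a ha, hkF b hb]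
      exact_mod_cast hlt
    · refine List.Pairwise.imp_of_mem ?_
        ((nodup_pairwise_idx keys hknd).sublist (hR ▸ List.filter_sublist))
      intro a b ha hb hlt
      rw [hkR a ha, hkR b hb]
      omega
    · intro a ha b hb
      have haf : a ∈ stacnotatorColumnOrder := (List.mem_filter.mp ha).1
      rw [hkF a ha, hkR b hb]
      have : List.idxOf a stacnotatorColumnOrder < stacnotatorColumnOrder.length :=
        List.idxOf_lt_length_of_mem haf
      omega
  exact (PySem.List.sorted_eq_of_perm_of_pairwise_lt keys (F ++ R) keyf hperm hpw).symm

-- ===== VERDICT (by name: the statement is the Claim_ definition above) =====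
theorem ordered_columns_py_spec : Claim_equal_ordered_columns_py := by
  intro records _
  exact ports_eq records
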